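-- pv_equiv track=rewrite | github.com/DNYoussef/the-agent-maker | src/phase6_baking/drift_meter.py | _generate_conversation_prompts
-- ===== SOURCE A (Python) =====
-- from typing import Any, Dict, List, Optional, Tuple
--
-- def _generate_conversation_prompts(num_turns: int) -> List[str]:
--     """Generate generic conversation prompts."""
--     base_prompts = [
--         "How do you approach problem-solving?",
--         "Can you explain your methodology?",
--         "What's your process for handling complex tasks?",
--         "How do you ensure accuracy?",
--         "What makes your responses helpful?",
--         "How do you handle uncertainty?",
--         "Describe your reasoning process.",
--         "What are your core principles?",
--         "How do you verify your answers?",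
--         "What's your approach to learning?",
--     ]
--
--     prompts = []
--     for i in range(num_turns):
--         prompts.append(base_prompts[i % len(base_prompts)])
--
--     return prompts
-- ===== SOURCE B (Python) =====
-- from typing import List
--
-- def _generate_conversation_prompts(num_turns: int) -> List[str]:
--     """Generate generic conversation prompts."""
--     base_prompts = [
--         "How do you approach problem-solving?",
--         "Can you explain your methodology?",
--         "What's your process for handling complex tasks?",
--         "How do you ensure accuracy?",
--         "What makes your responses helpful?",
--         "How do you handle uncertainty?",
--         "Describe your reasoning process.",
--         "What are your core principles?",
--         "How do you verify your answers?",
--         "What's your approach to learning?",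
--     ]
--     n = max(num_turns, 0)
--     reps = n // len(base_prompts) + 1
--     return (base_prompts * reps)[:n]
-- ===== Notes on version B (the rewrite author's own statement) =====
-- stated objective: simpler
-- what changed: Replaces the per-turn loop with modulo indexing by bulk replication of the base list (n // len + 1 copies) followed by a single truncating slice, clamping negative num_turns to 0.
import Mathlib
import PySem

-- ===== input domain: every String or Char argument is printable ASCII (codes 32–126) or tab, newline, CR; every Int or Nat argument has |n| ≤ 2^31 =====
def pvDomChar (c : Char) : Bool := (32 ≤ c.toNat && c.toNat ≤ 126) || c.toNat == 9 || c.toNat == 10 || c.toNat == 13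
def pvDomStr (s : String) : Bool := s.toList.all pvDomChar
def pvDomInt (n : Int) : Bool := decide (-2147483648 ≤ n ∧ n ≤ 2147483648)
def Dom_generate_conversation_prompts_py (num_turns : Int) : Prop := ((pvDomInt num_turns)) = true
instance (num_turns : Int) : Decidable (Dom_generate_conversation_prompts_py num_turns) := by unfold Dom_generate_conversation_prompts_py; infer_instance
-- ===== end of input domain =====

-- B replaces A's per-turn loop with modulo indexing by bulk replication of the base
-- list and a single truncating slice (objective: simpler).

-- the fixed list of base prompts (shared data, not logic)
def pvBasePrompts : List String :=
  [ "How do you approach problem-solving?",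
    "Can you explain your methodology?",
    "What's your process for handling complex tasks?",
    "How do you ensure accuracy?",
    "What makes your responses helpful?",
    "How do you handle uncertainty?",
    "Describe your reasoning process.",
    "What are your core principles?",
    "How do you verify your answers?",
    "What's your approach to learning?" ]

-- ===== PORT A =====
-- for i in range(num_turns): prompts.append(base_prompts[i % len(base_prompts)])
-- pyGetD with default "" is exact here: 0 ≤ i % 10 < 10, so Python never raises.
def generate_conversation_prompts_py (num_turns : Int) : List String :=
  (PySem.List.pyRange 0 num_turns 1).foldl
    (fun prompts i =>
      prompts ++ [PySem.List.pyGetD pvBasePrompts (PySem.Int.mod i (pvBasePrompts.length : Int)) ""])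
    []

-- ===== PORT B =====
-- n = max(num_turns, 0); reps = n // len + 1; return (base_prompts * reps)[:n]
def generate_conversation_prompts_py_alt (num_turns : Int) : List String :=
  let n : Int := max num_turns 0
  let reps : Int := PySem.Int.floordiv n (pvBasePrompts.length : Int) + 1
  PySem.List.slice ((List.replicate reps.toNat pvBasePrompts).flatten) none (some n)

-- ===== PRECONDITION & SPEC =====
def Spec_generate_conversation_prompts_py (num_turns : Int) (out : List String) : Prop := out = generate_conversation_prompts_py_alt num_turns
instance (num_turns : Int) (out : List String) : Decidable (Spec_generate_conversation_prompts_py num_turns out) := by unfold Spec_generate_conversation_prompts_py; infer_instance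

-- ===== CLAIM (what is proved, stated in full; the proofs are below) =====
def Claim_equal_generate_conversation_prompts_py : Prop := ∀ (num_turns : Int), Dom_generate_conversation_prompts_py num_turns → Spec_generate_conversation_prompts_py num_turns (generate_conversation_prompts_py num_turns)

-- ===== LEMMAS AND PROOFS =====

-- the common description: turn i gets base prompt i % 10
def pvCycle (i : Nat) : String := pvBasePrompts.getD (i % pvBasePrompts.length) ""

lemma pvBase_len : pvBasePrompts.length = 10 := by decide

lemma take_eq_map_range {α : Type} (l : List α) (d : α) (N : Nat) (h : N ≤ l.length) :
    l.take N = (List.range N).map (fun i => l.getD i d) := by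
  apply List.ext_getElem
  · simp [Nat.min_eq_left h]
  · intro i h1 h2
    simp at h1 ⊢
    simp [List.getElem?_eq_getElem h1.2]

lemma range_map_cycle_full :
    (List.range 10).map pvCycle = pvBasePrompts := by decide

lemma flatten_take_eq (k N : Nat) (h : N ≤ k * 10) :
    ((List.replicate k pvBasePrompts).flatten).take N = (List.range N).map pvCycle := by
  induction k generalizing N with
  | zero =>
    have : N = 0 := by omega
    subst this; simp
  | succ k ih =>
    rw [List.replicate_succ, List.flatten_cons]
    by_cases hN : N ≤ 10
    · rw [List.take_append_of_le_length (by rw [pvBase_len]; exact hN)]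
      rw [take_eq_map_range pvBasePrompts "" N (by rw [pvBase_len]; exact hN)]
      apply List.map_congr_left
      intro i hi
      simp at hi
      simp [pvCycle, pvBase_len, Nat.mod_eq_of_lt (by omega : i < 10)]
    · obtain ⟨M, rfl⟩ : ∃ M, N = 10 + M := ⟨N - 10, by omega⟩
      rw [List.take_append]
      rw [pvBase_len]
      have h1 : List.take (10 + M) pvBasePrompts = pvBasePrompts := by
        apply List.take_of_length_le; rw [pvBase_len]; omega
      rw [h1]
      have h2 : 10 + M - 10 = M := by omega
      rw [h2, ih M (by omega)]
      have hsecond : List.map pvCycle (List.map (fun x => 10 + x) (List.range M))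
          = List.map pvCycle (List.range M) := by
        rw [List.map_map]
        apply List.map_congr_left
        intro i _
        simp [pvCycle, pvBase_len, Function.comp, Nat.add_mod_left]
      rw [List.range_add, List.map_append, range_map_cycle_full, hsecond]

lemma A_eq (num_turns : Int) :
    generate_conversation_prompts_py num_turns
      = (List.range (max num_turns 0).toNat).map pvCycle := by
  unfold generate_conversation_prompts_py
  by_cases h : 0 ≤ num_turns
  · have : num_turns = ((num_turns.toNat : Nat) : Int) := by omega
    rw [this, PySem.List.pyRange_zero_natCast]
    rw [PySem.List.foldl_append_singleton_eq_map]
    simp only [List.nil_append, List.map_map]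
    have hm : (max (((num_turns.toNat : Nat) : Int)) 0).toNat = num_turns.toNat := by omega
    rw [hm]
    apply List.map_congr_left
    intro i _
    simp only [Function.comp]
    have hmod : PySem.Int.mod ((i : Nat) : Int) ((pvBasePrompts.length : Nat) : Int)
        = (((i % 10 : Nat) : Nat) : Int) := by
      rw [pvBase_len]; exact_mod_cast PySem.Int.mod_natCast i 10
    rw [hmod, PySem.List.pyGetD_natCast]
    simp [pvCycle, pvBase_len, List.getD]
  · have h1 : PySem.List.pyRange 0 num_turns 1 = [] := by
      simp [PySem.List.pyRange]
      omega
    have h2 : (max num_turns 0).toNat = 0 := by omega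
    rw [h1, h2]
    simp

lemma B_eq (num_turns : Int) :
    generate_conversation_prompts_py_alt num_turns
      = (List.range (max num_turns 0).toNat).map pvCycle := by
  unfold generate_conversation_prompts_py_alt
  simp only []
  set n : Int := max num_turns 0 with hn
  have hn0 : 0 ≤ n := by simp [hn]
  set N : Nat := n.toNat with hN
  have hcast : n = ((N : Nat) : Int) := by omega
  rw [PySem.List.slice_to _ hn0]
  have hdiv : (PySem.Int.floordiv n (pvBasePrompts.length : Int) + 1).toNat = N / 10 + 1 := by
    rw [pvBase_len, hcast, PySem.Int.floordiv_natCast]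
    omega
  rw [hdiv]
  exact flatten_take_eq (N / 10 + 1) N (by omega)

-- ===== VERDICT (by name: the statement is the Claim_ definition above) =====
theorem generate_conversation_prompts_py_spec : Claim_equal_generate_conversation_prompts_py := by
  intro num_turns _
  unfold Spec_generate_conversation_prompts_py
  rw [A_eq, B_eq]
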